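-- pv_equiv track=rewrite | github.com/nurturegrit/Sabudh_Internship | Data Science/Coding Challenge Week 3/solution7.py | successful
-- ===== SOURCE A (Python) =====
-- def successful(potions, spells, success):
--     ans = []
--     for spell in spells:
--         n = 0
--         for potion in potions:
--             if spell*potion >= success:
--                 n += 1
--         ans.append(n)
--     return ans
-- ===== SOURCE B (Python) =====
-- def successful(potions, spells, success):
--     ps = sorted(potions)
--     n = len(ps)
--
--     def first_true(pred):
--         # smallest index i with pred(ps[i]); n if none (pred monotone along ps)
--         lo, hi = 0, n
--         while lo < hi:
--             mid = (lo + hi) // 2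
--             if pred(ps[mid]):
--                 hi = mid
--             else:
--                 lo = mid + 1
--         return lo
--
--     ans = []
--     for s in spells:
--         if s > 0:
--             ans.append(n - first_true(lambda p: s * p >= success))
--         elif s < 0:
--             ans.append(first_true(lambda p: s * p < success))
--         else:
--             ans.append(n if success <= 0 else 0)
--     return ans
-- ===== Notes on version B (the rewrite author's own statement) =====
-- stated objective: faster
-- what changed: B sorts the potions once and answers each spell with a binary search for the monotone threshold (splitting on the spell's sign), replacing A's inner linear scan per spell.
import Mathlib
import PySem

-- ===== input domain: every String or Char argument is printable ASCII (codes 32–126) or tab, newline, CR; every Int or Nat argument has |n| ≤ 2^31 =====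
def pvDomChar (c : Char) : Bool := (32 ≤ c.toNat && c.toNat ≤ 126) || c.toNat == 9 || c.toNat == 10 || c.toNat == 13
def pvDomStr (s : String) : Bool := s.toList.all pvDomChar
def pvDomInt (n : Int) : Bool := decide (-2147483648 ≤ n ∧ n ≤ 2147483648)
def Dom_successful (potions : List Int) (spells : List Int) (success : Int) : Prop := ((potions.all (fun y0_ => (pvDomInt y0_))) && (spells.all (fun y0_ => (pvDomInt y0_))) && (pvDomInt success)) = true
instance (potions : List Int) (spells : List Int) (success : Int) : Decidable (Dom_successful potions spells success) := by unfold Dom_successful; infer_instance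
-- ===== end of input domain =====

-- ===== PORT A =====
-- A: for each spell, a linear scan counting potions with spell*potion >= success.
def successful (potions : List Int) (spells : List Int) (success : Int) : List Int :=
  spells.foldl (fun ans spell =>
    ans ++ [potions.foldl (fun n potion => if spell * potion ≥ success then n + 1 else n) 0]) []

-- ===== PORT B =====
-- B (from Source B): sort potions once; per spell, binary search the first index where the
-- sign-dependent monotone predicate turns true.  ps[mid] is ported as getD mid 0: the
-- recursion keeps mid < hi ≤ ps.length, so the index is always in range (as in Python);
-- (lo+hi)//2 on the nonnegative lo, hi is Nat division, exactly Python's floor division.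
def firstTrue (ps : List Int) (pred : Int → Bool) (lo hi : Nat) : Nat :=
  if h : lo < hi then
    let mid := (lo + hi) / 2
    if pred (ps.getD mid 0) then firstTrue ps pred lo mid
    else firstTrue ps pred (mid + 1) hi
  else lo
termination_by hi - lo
decreasing_by all_goals omega

def successful_alt (potions : List Int) (spells : List Int) (success : Int) : List Int :=
  let ps := PySem.List.sorted potions (fun x => x) false
  let n := ps.length
  spells.foldl (fun ans s =>
    ans ++ [if s > 0 then ((n - firstTrue ps (fun p => decide (s * p ≥ success)) 0 n : Nat) : Int)
            else if s < 0 then ((firstTrue ps (fun p => decide (s * p < success)) 0 n : Nat) : Int)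
            else if success ≤ 0 then (n : Int) else 0]) []

-- ===== PRECONDITION & SPEC =====
def Spec_successful (potions : List Int) (spells : List Int) (success : Int) (out : List Int) : Prop := out = successful_alt potions spells success
instance (potions : List Int) (spells : List Int) (success : Int) (out : List Int) : Decidable (Spec_successful potions spells success out) := by unfold Spec_successful; infer_instance

-- ===== CLAIM (what is proved, stated in full; the proofs are below) =====
def Claim_equal_successful : Prop := ∀ (potions : List Int) (spells : List Int) (success : Int), Dom_successful potions spells success → Spec_successful potions spells success (successful potions spells success)

-- ===== LEMMAS AND PROOFS =====

-- A's inner loop counts matches.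
theorem foldl_count (P : Int → Prop) [DecidablePred P] (l : List Int) (c : Int) :
    l.foldl (fun n p => if P p then n + 1 else n) c = c + (l.countP (fun p => decide (P p)) : Int) := by
  induction l generalizing c with
  | nil => simp
  | cons x t ih =>
    simp only [List.foldl_cons, List.countP_cons, ih]
    by_cases h : P x
    · simp [h]; ring
    · simp [h]

-- firstTrue maintains the bisection invariant.
theorem firstTrue_inv (ps : List Int) (pred : Int → Bool) (lo hi : Nat)
    (hle : lo ≤ hi) (hhi : hi ≤ ps.length)
    (hmono : ∀ i j, (hj : j < ps.length) → (hij : i ≤ j) → pred (ps[i]'(by omega)) = true → pred ps[j] = true)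
    (hlo : ∀ i, i < lo → (h : i < ps.length) → pred ps[i] = false)
    (hup : ∀ i, hi ≤ i → (h : i < ps.length) → pred ps[i] = true) :
    lo ≤ firstTrue ps pred lo hi ∧ firstTrue ps pred lo hi ≤ hi ∧
    (∀ i, i < firstTrue ps pred lo hi → (h : i < ps.length) → pred ps[i] = false) ∧
    (∀ i, firstTrue ps pred lo hi ≤ i → (h : i < ps.length) → pred ps[i] = true) := by
  induction lo, hi using firstTrue.induct ps pred with
  | case1 lo hi h mid hpred ih =>
    have hmidlt : mid < ps.length := by simp only [mid]; omega
    rw [List.getD_eq_getElem ps 0 hmidlt] at hpred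
    have hmid : lo ≤ mid ∧ mid < hi := by simp only [mid]; omega
    obtain ⟨c1, c2, c3, c4⟩ := ih (by omega) (by omega) hmono hlo
      (fun i hmi h => hmono mid i h hmi hpred)
    have hmeq : mid = (lo + hi) / 2 := rfl
    rw [hmeq] at c1 c2 c3 c4
    rw [firstTrue, dif_pos h, if_pos (by rw [List.getD_eq_getElem ps 0 hmidlt]; exact hpred)]
    exact ⟨c1, by omega, c3, c4⟩
  | case2 lo hi h mid hpred ih =>
    have hmidlt : mid < ps.length := by simp only [mid]; omega
    rw [List.getD_eq_getElem ps 0 hmidlt] at hpred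
    have hmid : lo ≤ mid ∧ mid < hi := by simp only [mid]; omega
    have hlo' : ∀ i, i < mid + 1 → (h : i < ps.length) → pred ps[i] = false := by
      intro i hi' h'
      by_cases hilo : i < lo
      · exact hlo i hilo h'
      · by_contra htr
        have : pred ps[mid] = true := hmono i mid hmidlt (by omega) (by
          cases hb : pred ps[i] with
          | true => rfl
          | false => exact absurd hb htr)
        simp [this] at hpred
    obtain ⟨c1, c2, c3, c4⟩ := ih (by omega) hhi hmono hlo' hup
    have hmeq : mid = (lo + hi) / 2 := rfl
    rw [hmeq] at c1 c2 c3 c4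
    rw [firstTrue, dif_pos h, if_neg (by rw [List.getD_eq_getElem ps 0 hmidlt]; simp [hpred])]
    exact ⟨by omega, c2, c3, c4⟩
  | case3 lo hi h =>
    rw [firstTrue, dif_neg h]
    exact ⟨le_refl _, hle, hlo, fun i hri h' => hup i (by omega) h'⟩

-- Counting a list that is false up to r and true from r on.
theorem countP_split_true (pred : Int → Bool) (l : List Int) (r : Nat) (hr : r ≤ l.length)
    (h1 : ∀ i, i < r → (h : i < l.length) → pred l[i] = false)
    (h2 : ∀ i, r ≤ i → (h : i < l.length) → pred l[i] = true) :
    l.countP pred = l.length - r := by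
  induction l generalizing r with
  | nil => simp
  | cons x t ih =>
    cases r with
    | zero =>
      have hall : ∀ a ∈ x :: t, pred a := by
        intro a ha
        obtain ⟨i, hi, rfl⟩ := List.mem_iff_getElem.mp ha
        exact h2 i (Nat.zero_le _) hi
      simp [List.countP_eq_length.mpr hall]
    | succ r' =>
      have hx : pred x = false := h1 0 (by omega) (by simp)
      have := ih r' (by simpa using hr)
        (fun i hi h => by simpa using h1 (i+1) (by omega) (by simpa using h))
        (fun i hi h => by simpa using h2 (i+1) (by omega) (by simpa using h))
      simp [hx, this]

-- Counting a list that is true up to r and false from r on.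
theorem countP_split_false (pred : Int → Bool) (l : List Int) (r : Nat) (hr : r ≤ l.length)
    (h1 : ∀ i, i < r → (h : i < l.length) → pred l[i] = true)
    (h2 : ∀ i, r ≤ i → (h : i < l.length) → pred l[i] = false) :
    l.countP pred = r := by
  induction l generalizing r with
  | nil => simp at hr ⊢; omega
  | cons x t ih =>
    cases r with
    | zero =>
      have hnone : ∀ a ∈ x :: t, ¬ pred a := by
        intro a ha
        obtain ⟨i, hi, rfl⟩ := List.mem_iff_getElem.mp ha
        simp [h2 i (Nat.zero_le _) hi]
      simp [List.countP_eq_zero.mpr hnone]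
    | succ r' =>
      have hx : pred x = true := h1 0 (by omega) (by simp)
      have := ih r' (by simpa using hr)
        (fun i hi h => by simpa using h1 (i+1) (by omega) (by simpa using h))
        (fun i hi h => by simpa using h2 (i+1) (by omega) (by simpa using h))
      simp [hx, this]

-- Both outer loops are maps written as foldl-with-append.
theorem foldl_append_map {α β : Type} (f : α → β) (l : List α) (acc : List β) :
    l.foldl (fun ans x => ans ++ [f x]) acc = acc ++ l.map f := by
  induction l generalizing acc with
  | nil => simp
  | cons x t ih => simp [ih]

-- Per spell, A's count equals B's binary-search answer.
theorem elem_eq (potions : List Int) (success s : Int) :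
    potions.foldl (fun n potion => if s * potion ≥ success then n + 1 else n) 0 =
    (if s > 0 then (((PySem.List.sorted potions (fun x => x) false).length -
        firstTrue (PySem.List.sorted potions (fun x => x) false) (fun p => decide (s * p ≥ success)) 0 (PySem.List.sorted potions (fun x => x) false).length : Nat) : Int)
     else if s < 0 then ((firstTrue (PySem.List.sorted potions (fun x => x) false) (fun p => decide (s * p < success)) 0 (PySem.List.sorted potions (fun x => x) false).length : Nat) : Int)
     else if success ≤ 0 then ((PySem.List.sorted potions (fun x => x) false).length : Int) else 0) := by
  set ps := PySem.List.sorted potions (fun x => x) false with hps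
  have hperm : ps.Perm potions := by rw [hps]; exact PySem.List.sorted_perm _ _ _
  have hcount : ∀ pr : Int → Bool, potions.countP pr = ps.countP pr :=
    fun pr => (hperm.countP_eq pr).symm
  have hlen : ps.length = potions.length := hperm.length_eq
  have hmono_ge : s > 0 → ∀ i j, (hj : j < ps.length) → (hij : i ≤ j) →
      (fun p => decide (s * p ≥ success)) (ps[i]'(by omega)) = true →
      (fun p => decide (s * p ≥ success)) ps[j] = true := by
    intro hs i j hj hij hp
    simp only [decide_eq_true_eq] at hp ⊢
    have hmo : ps[i]'(by omega) ≤ ps[j] := by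
      simp only [hps] at hj ⊢
      exact PySem.List.sorted_id_getElem_mono potions hij hj
    nlinarith
  have hmono_lt : s < 0 → ∀ i j, (hj : j < ps.length) → (hij : i ≤ j) →
      (fun p => decide (s * p < success)) (ps[i]'(by omega)) = true →
      (fun p => decide (s * p < success)) ps[j] = true := by
    intro hs i j hj hij hp
    simp only [decide_eq_true_eq] at hp ⊢
    have hmo : ps[i]'(by omega) ≤ ps[j] := by
      simp only [hps] at hj ⊢
      exact PySem.List.sorted_id_getElem_mono potions hij hj
    nlinarith
  by_cases hs : s > 0
  · rw [if_pos hs, foldl_count (fun p => s * p ≥ success)]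
    obtain ⟨c1, c2, c3, c4⟩ := firstTrue_inv ps (fun p => decide (s * p ≥ success)) 0 ps.length
      (Nat.zero_le _) le_rfl (hmono_ge hs)
      (fun i hi h => absurd hi (by omega)) (fun i hi h => absurd h (by omega))
    have hcp := countP_split_true (fun p => decide (s * p ≥ success)) ps _ c2 c3 c4
    rw [hcount, hcp]
    omega
  · by_cases hs' : s < 0
    · rw [if_neg hs, if_pos hs', foldl_count (fun p => s * p ≥ success)]
      obtain ⟨c1, c2, c3, c4⟩ := firstTrue_inv ps (fun p => decide (s * p < success)) 0 ps.length
        (Nat.zero_le _) le_rfl (hmono_lt hs')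
        (fun i hi h => absurd hi (by omega)) (fun i hi h => absurd h (by omega))
      have hcp := countP_split_false (fun p => decide (s * p ≥ success)) ps _ c2
        (fun i hi h => by
          have := c3 i hi h
          simp only [decide_eq_true_eq, decide_eq_false_iff_not, not_lt] at this ⊢
          exact this)
        (fun i hi h => by
          have := c4 i hi h
          simp only [decide_eq_true_eq, decide_eq_false_iff_not, not_le] at this ⊢
          exact this)
      rw [hcount, hcp]
      omega
    · have hz : s = 0 := by omega
      subst hz
      rw [if_neg hs, if_neg hs', foldl_count (fun p => 0 * p ≥ success)]
      by_cases hsu : success ≤ 0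
      · rw [if_pos hsu, List.countP_eq_length.mpr (fun a _ => by simpa using hsu)]
        omega
      · rw [if_neg hsu, List.countP_eq_zero.mpr (fun a _ => by simpa using hsu)]
        simp

-- ===== VERDICT (by name: the statement is the Claim_ definition above) =====
theorem successful_spec : Claim_equal_successful := by
  intro potions spells success _
  unfold Spec_successful successful successful_alt
  rw [foldl_append_map, foldl_append_map]
  simp only [List.nil_append]
  exact List.map_congr_left (fun s _ => elem_eq potions success s)
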